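-- pv_equiv track=rewrite | github.com/satyam8254/Python-program | python-code/recursiveSequence.py | recursiveSequence
-- ===== SOURCE A (Python) =====
-- def recursiveSequence(n):
--     if n==1:
--         return 1
--     term=1
--     start=((n-1)*(n-1+1))//2+1
--     end=start+n
--     for i in range(start,end):
--         term=term*i
--     return recursiveSequence(n-1)+term
-- ===== SOURCE B (Python) =====
-- def recursiveSequence(n):
--     total = 0
--     for k in range(1, n + 1):
--         start = ((k - 1) * k) // 2 + 1
--         prod = 1
--         for i in range(start, start + k):
--             prod = prod * i
--         total = total + prod
--     return total
-- ===== Notes on version B (the rewrite author's own statement) =====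
-- stated objective: simpler
-- what changed: Replaced the recursion on n (one stack frame per block) by a single iterative accumulator loop over k=1..n, computing each consecutive-integer block product locally and summing them.
-- outside the precondition, e.g. on recursiveSequence(0): A raises RecursionError, B returns 0
import Mathlib
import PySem

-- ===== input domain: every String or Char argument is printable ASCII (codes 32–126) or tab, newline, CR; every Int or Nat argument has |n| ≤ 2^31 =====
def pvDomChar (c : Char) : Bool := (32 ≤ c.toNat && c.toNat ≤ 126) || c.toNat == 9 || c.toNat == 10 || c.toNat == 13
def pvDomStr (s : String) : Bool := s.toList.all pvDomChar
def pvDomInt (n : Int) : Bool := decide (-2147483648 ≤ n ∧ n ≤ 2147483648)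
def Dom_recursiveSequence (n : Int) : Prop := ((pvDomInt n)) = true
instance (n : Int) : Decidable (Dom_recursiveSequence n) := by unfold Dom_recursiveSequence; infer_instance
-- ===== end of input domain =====

-- B replaces A's recursion over blocks by a single iterative accumulator loop (simpler; same cost).


-- ===== PORT A =====
-- A recurses on n-1; for n ≤ 0 Python never terminates (RecursionError), outside Pre_.
-- We transliterate with a Nat fuel n.toNat, exactly enough for every n ≥ 1; out of fuel returns 0 (unreachable inside Pre_).
def recursiveSequenceGo : Nat → Int → Int
  | 0, _ => 0
  | Nat.succ f, n =>
    if n == 1 then 1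
    else
      let start := PySem.Int.floordiv ((n - 1) * (n - 1 + 1)) 2 + 1
      let «end» := start + n
      let term := (PySem.List.pyRange start «end» 1).foldl (fun term i => term * i) 1
      recursiveSequenceGo f (n - 1) + term

def recursiveSequence (n : Int) : Int := recursiveSequenceGo n.toNat n

-- ===== PORT B =====
def recursiveSequence_alt (n : Int) : Int :=
  (PySem.List.pyRange 1 (n + 1) 1).foldl
    (fun total k =>
      let start := PySem.Int.floordiv ((k - 1) * k) 2 + 1
      let prod := (PySem.List.pyRange start (start + k) 1).foldl (fun prod i => prod * i) 1
      total + prod) 0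

-- ===== PRECONDITION & SPEC =====
-- Pre_ excludes n ≤ 0, on which A recurses forever and raises RecursionError.
def Pre_recursiveSequence (n : Int) : Prop := 1 ≤ n
instance (n : Int) : Decidable (Pre_recursiveSequence n) := by unfold Pre_recursiveSequence; infer_instance
def pvWitness_recursiveSequence : Int := 3

def Spec_recursiveSequence (n : Int) (out : Int) : Prop := out = recursiveSequence_alt n
instance (n : Int) (out : Int) : Decidable (Spec_recursiveSequence n out) := by unfold Spec_recursiveSequence; infer_instance

-- ===== CLAIM (what is proved, stated in full; the proofs are below) =====
def Claim_equal_recursiveSequence : Prop := ∀ (n : Int), Dom_recursiveSequence n → Pre_recursiveSequence n → Spec_recursiveSequence n (recursiveSequence n)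

-- ===== LEMMAS AND PROOFS =====

-- the k-th block product, shared shape of both ports' inner loops
def blockProd (k : Int) : Int :=
  (PySem.List.pyRange (PySem.Int.floordiv ((k - 1) * k) 2 + 1)
    (PySem.Int.floordiv ((k - 1) * k) 2 + 1 + k) 1).foldl (fun p i => p * i) 1

lemma alt_succ (n : Int) (h : 1 ≤ n) :
    recursiveSequence_alt n = recursiveSequence_alt (n - 1) + blockProd n := by
  unfold recursiveSequence_alt
  have h1 : (1 : Int) ≤ n - 1 + 1 := by omega
  have : n + 1 = (n - 1 + 1) + 1 := by ring
  rw [this, PySem.List.pyRange_one_succ_right h1, List.foldl_append]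
  simp [blockProd]

lemma go_eq_alt (m : Nat) (n : Int) (h1 : 1 ≤ n) (h2 : n ≤ m) :
    recursiveSequenceGo m n = recursiveSequence_alt n := by
  induction m generalizing n with
  | zero => omega
  | succ f ih =>
    rw [recursiveSequenceGo]
    by_cases hn : n = 1
    · subst hn
      simp
      decide
    · have hne : (n == 1) = false := by simp [hn]
      rw [hne]
      simp only [Bool.false_eq_true, if_false]
      have hterm : (PySem.List.pyRange (PySem.Int.floordiv ((n - 1) * (n - 1 + 1)) 2 + 1)
          (PySem.Int.floordiv ((n - 1) * (n - 1 + 1)) 2 + 1 + n) 1).foldl (fun t i => t * i) 1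
          = blockProd n := by
        unfold blockProd
        norm_num
      rw [ih (n - 1) (by omega) (by omega)]
      rw [alt_succ n h1]
      rw [hterm]

-- ===== VERDICT (by name: the statement is the Claim_ definition above) =====
theorem recursiveSequence_spec : Claim_equal_recursiveSequence := by
  intro n _ hpre
  unfold Spec_recursiveSequence recursiveSequence
  exact go_eq_alt n.toNat n hpre (by omega)
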